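-- pv_equiv track=rewrite | github.com/M1LNES/DBM2-F1 | script/circuit_mapper.py | find_circuit_id
-- ===== SOURCE A (Python) =====
-- def find_circuit_id(race_name, keyword_to_circuit):
--     """Najde circuit_id podle klíčového slova v názvu závodu"""
--     race_name_lower = race_name.lower()
--
--     # Nejprve úplná shoda
--     for keyword, circuit_id in keyword_to_circuit.items():
--         if keyword.lower() == race_name_lower:
--             return circuit_id
--
--     # Pak částečná shoda
--     for keyword, circuit_id in keyword_to_circuit.items():
--         if keyword.lower() in race_name_lower:
--             return circuit_id
--
--     return None
-- ===== SOURCE B (Python) =====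
-- def find_circuit_id(race_name, keyword_to_circuit):
--     """Single pass: exact match returns immediately, first substring match is
--     remembered behind a found-flag and returned after the loop."""
--     race_name_lower = race_name.lower()
--     found = False
--     candidate = None
--     for keyword, circuit_id in keyword_to_circuit.items():
--         kl = keyword.lower()
--         if kl == race_name_lower:
--             return circuit_id
--         if not found and kl in race_name_lower:
--             found = True
--             candidate = circuit_id
--     return candidate if found else None
-- ===== Notes on version B (the rewrite author's own statement) =====
-- stated objective: simpler
-- what changed: One single pass over the items with a found-flag and a remembered first substring candidate replaces A's two full passes (exact-match pass then substring pass), lowering each keyword only once.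
import Mathlib
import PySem

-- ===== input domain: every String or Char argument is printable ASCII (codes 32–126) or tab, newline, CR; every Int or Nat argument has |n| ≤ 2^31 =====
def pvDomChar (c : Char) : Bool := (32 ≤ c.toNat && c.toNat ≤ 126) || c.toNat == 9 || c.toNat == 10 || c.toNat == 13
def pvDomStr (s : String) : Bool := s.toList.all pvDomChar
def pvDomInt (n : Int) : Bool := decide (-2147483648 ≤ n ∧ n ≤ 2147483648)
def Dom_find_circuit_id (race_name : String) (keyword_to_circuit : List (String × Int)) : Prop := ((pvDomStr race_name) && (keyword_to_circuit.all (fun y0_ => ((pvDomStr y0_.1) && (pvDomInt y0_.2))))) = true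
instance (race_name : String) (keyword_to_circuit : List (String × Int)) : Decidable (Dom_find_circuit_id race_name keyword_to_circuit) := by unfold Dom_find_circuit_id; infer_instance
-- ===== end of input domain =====

-- B replaces A's two full passes by one single pass that returns an exact match
-- immediately and remembers the first substring candidate behind a found-flag (objective: simpler).


-- ===== PORT A =====
-- first loop of A: exact match on lowered keyword
def pvExactLoop (rl : String) : List (String × Int) → Option Int
  | [] => none
  | (k, c) :: rest =>
      if PySem.Str.lower k == rl then some c else pvExactLoop rl rest

-- second loop of A: substring match of lowered keyword
def pvSubLoop (rl : String) : List (String × Int) → Option Int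
  | [] => none
  | (k, c) :: rest =>
      if PySem.Str.isIn (PySem.Str.lower k) rl then some c else pvSubLoop rl rest

def find_circuit_id (race_name : String) (keyword_to_circuit : List (String × Int)) : Option Int :=
  let rl := PySem.Str.lower race_name
  match pvExactLoop rl keyword_to_circuit with
  | some c => some c
  | none => pvSubLoop rl keyword_to_circuit

-- ===== PORT B =====
-- B's single pass: 'found'/'candidate' mirror Source B's flag and variable
def pvAltLoop (rl : String) (found : Bool) (candidate : Option Int) :
    List (String × Int) → Option Int
  | [] => if found then candidate else none
  | (k, c) :: rest =>
      let kl := PySem.Str.lower k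
      if kl == rl then some c
      else if !found && PySem.Str.isIn kl rl then pvAltLoop rl true (some c) rest
      else pvAltLoop rl found candidate rest

def find_circuit_id_alt (race_name : String) (keyword_to_circuit : List (String × Int)) : Option Int :=
  pvAltLoop (PySem.Str.lower race_name) false none keyword_to_circuit

-- ===== PRECONDITION & SPEC =====
def Spec_find_circuit_id (race_name : String) (keyword_to_circuit : List (String × Int)) (out : Option Int) : Prop := out = find_circuit_id_alt race_name keyword_to_circuit
instance (race_name : String) (keyword_to_circuit : List (String × Int)) (out : Option Int) : Decidable (Spec_find_circuit_id race_name keyword_to_circuit out) := by unfold Spec_find_circuit_id; infer_instance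

-- ===== CLAIM (what is proved, stated in full; the proofs are below) =====
def Claim_equal_find_circuit_id : Prop := ∀ (race_name : String) (keyword_to_circuit : List (String × Int)), Dom_find_circuit_id race_name keyword_to_circuit → Spec_find_circuit_id race_name keyword_to_circuit (find_circuit_id race_name keyword_to_circuit)

-- ===== LEMMAS AND PROOFS =====

-- Invariant of B's loop: it returns the first exact match if any; otherwise the
-- saved candidate if the flag is set; otherwise the first substring match.
theorem pvAltLoop_eq (rl : String) :
    ∀ (l : List (String × Int)) (found : Bool) (candidate : Option Int),
      pvAltLoop rl found candidate l =
        match pvExactLoop rl l with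
        | some c => some c
        | none => if found then candidate else pvSubLoop rl l := by
  intro l
  induction l with
  | nil => intro found candidate; simp [pvAltLoop, pvExactLoop, pvSubLoop]
  | cons p rest ih =>
      intro found candidate
      obtain ⟨k, c⟩ := p
      simp only [pvAltLoop, pvExactLoop, pvSubLoop]
      by_cases he : PySem.Str.lower k == rl
      · simp [he]
      · simp only [he, if_false, Bool.false_eq_true]
        by_cases hs : PySem.Chars.isIn (PySem.Chars.lower k.toList) rl.toList = true
        · cases found with
          | false => simp [PySem.Str.isIn, hs, ih]
          | true => simp [PySem.Str.isIn, hs, ih]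
        · cases found with
          | false => simp [PySem.Str.isIn, hs, ih]
          | true => simp [PySem.Str.isIn, hs, ih]

-- ===== VERDICT (by name: the statement is the Claim_ definition above) =====
theorem find_circuit_id_spec : Claim_equal_find_circuit_id := by
  intro race_name kv _
  unfold Spec_find_circuit_id find_circuit_id find_circuit_id_alt
  rw [pvAltLoop_eq]
  cases h : pvExactLoop (PySem.Str.lower race_name) kv <;> simp [h]
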